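-- pv_equiv track=rewrite | github.com/langchain-ai/langchain-benchmarks | agents/parser.py | _remove_unescaped_new_lines
-- ===== SOURCE A (Python) =====
-- def _remove_unescaped_new_lines(input_str: str) -> str:
--     """Remove unescaped new lines from the input string."""
--     result = []
--     i = 0
--     while i < len(input_str):
--         if input_str[i] == "\\" and i + 1 < len(input_str) and input_str[i + 1] == "\n":
--             # If a backslash is followed by a newline,
--             # keep both characters (escaped newline)
--             result.append(input_str[i : i + 2])
--             i += 2
--         elif input_str[i] == "\n":
--             # If it's an unescaped newline, skip it
--             i += 1
--         else:
--             # Otherwise, keep the character as is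
--             result.append(input_str[i])
--             i += 1
--
--     return "".join(result)
-- ===== SOURCE B (Python) =====
-- def _remove_unescaped_new_lines(input_str: str) -> str:
--     """Remove unescaped new lines from the input string."""
--     return "".join(
--         c
--         for i, c in enumerate(input_str)
--         if c != "\n" or (i > 0 and input_str[i - 1] == "\\")
--     )
-- ===== Notes on version B (the rewrite author's own statement) =====
-- stated objective: simpler
-- what changed: A's forward while-loop with variable step (+1/+2), lookahead and slice appends is replaced by a single comprehension that keeps a character unless it is a newline not preceded by a backslash (one backward look per char).
import Mathlib
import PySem

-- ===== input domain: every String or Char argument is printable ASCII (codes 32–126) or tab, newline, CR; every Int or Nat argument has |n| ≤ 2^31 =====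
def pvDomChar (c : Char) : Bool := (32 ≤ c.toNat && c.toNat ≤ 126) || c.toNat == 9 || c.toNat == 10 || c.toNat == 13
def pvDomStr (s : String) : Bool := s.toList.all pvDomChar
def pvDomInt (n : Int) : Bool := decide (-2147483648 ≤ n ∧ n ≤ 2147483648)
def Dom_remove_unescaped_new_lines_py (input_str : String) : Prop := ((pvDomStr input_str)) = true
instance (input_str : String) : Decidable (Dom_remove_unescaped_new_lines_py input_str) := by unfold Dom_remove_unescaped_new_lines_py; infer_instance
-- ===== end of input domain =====

-- B replaces A's forward scan (variable step +1/+2 with lookahead) by a single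
-- backward-looking filter over the enumerated characters; objective: simpler.

-- ===== PORT A =====
-- A's while loop over index i with accumulator `result`, step for step.
def pvGoA (cs : List Char) (i : Nat) (acc : List Char) : List Char :=
  if i < cs.length then
    if cs[i]! = '\\' ∧ i + 1 < cs.length ∧ cs[i + 1]! = '\n' then
      pvGoA cs (i + 2) (acc ++ [cs[i]!, cs[i + 1]!])
    else if cs[i]! = '\n' then
      pvGoA cs (i + 1) acc
    else
      pvGoA cs (i + 1) (acc ++ [cs[i]!])
  else acc
termination_by cs.length - i

def remove_unescaped_new_lines_py (input_str : String) : String :=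
  String.mk (pvGoA input_str.toList 0 [])

-- ===== PORT B =====
-- Source B: keep each character unless it is a '\n' not preceded by a backslash.
def remove_unescaped_new_lines_py_alt (input_str : String) : String :=
  let cs := input_str.toList
  String.mk (((cs.zipIdx.filter
    (fun p => p.1 != '\n' || (decide (0 < p.2) && (cs[p.2 - 1]! == '\\')))).map Prod.fst))

-- ===== PRECONDITION & SPEC =====
def Spec_remove_unescaped_new_lines_py (input_str : String) (out : String) : Prop := out = remove_unescaped_new_lines_py_alt input_str
instance (input_str : String) (out : String) : Decidable (Spec_remove_unescaped_new_lines_py input_str out) := by unfold Spec_remove_unescaped_new_lines_py; infer_instance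

-- ===== CLAIM (what is proved, stated in full; the proofs are below) =====
def Claim_equal_remove_unescaped_new_lines_py : Prop := ∀ (input_str : String), Dom_remove_unescaped_new_lines_py input_str → Spec_remove_unescaped_new_lines_py input_str (remove_unescaped_new_lines_py input_str)

-- ===== LEMMAS AND PROOFS =====

-- A's loop from index i equals B's filter restricted to positions ≥ i, given the
-- reachability invariant: A is never at a '\n' whose predecessor is a backslash.
theorem pvGoA_eq (cs : List Char) (i : Nat) (acc : List Char)
    (hinv : ¬ (0 < i ∧ i < cs.length ∧ cs[i - 1]! = '\\' ∧ cs[i]! = '\n')) :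
    pvGoA cs i acc =
      acc ++ (((cs.drop i).zipIdx i).filter
        (fun p => p.1 != '\n' || (decide (0 < p.2) && (cs[p.2 - 1]! == '\\')))).map Prod.fst := by
  rw [pvGoA]
  split
  · rename_i hi
    have hdrop : cs.drop i = cs[i]! :: cs.drop (i + 1) := by
      rw [getElem!_pos cs i hi]
      exact List.drop_eq_getElem_cons hi
    split
    · rename_i hpair
      obtain ⟨hb, hi1, hn⟩ := hpair
      have hdrop1 : cs.drop (i+1) = cs[i+1]! :: cs.drop (i + 2) := by
        rw [getElem!_pos cs (i+1) hi1]
        exact List.drop_eq_getElem_cons hi1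
      rw [pvGoA_eq cs (i+2) _ (by
        rintro ⟨-, -, hb2, -⟩
        simp only [show i + 2 - 1 = i + 1 from rfl] at hb2
        rw [hn] at hb2; exact absurd hb2 (by decide))]
      rw [hdrop, hdrop1]
      simp only [List.zipIdx_cons, List.filter_cons]
      have c1 : ((cs[i]! != '\n' || (decide (0 < i) && (cs[i - 1]! == '\\'))) : Bool) = true := by
        rw [hb]; simp
      have c2 : ((cs[i+1]! != '\n' || (decide (0 < (i+1)) && (cs[(i+1) - 1]! == '\\'))) : Bool) = true := by
        simp only [Nat.add_sub_cancel, hb]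
        simp
      simp only [c1, c2, if_true, List.map_cons]
      simp
    · rename_i hnp
      by_cases hn : cs[i]! = '\n'
      · simp only [if_pos hn]
        have hkeepfalse : ((cs[i]! != '\n' || (decide (0 < i) && (cs[i - 1]! == '\\'))) : Bool) = false := by
          rw [hn]
          simp only [bne_self_eq_false, Bool.false_or, Bool.and_eq_false_iff]
          by_cases h0 : 0 < i
          · right
            simp only [beq_eq_false_iff_ne]
            intro hbb
            exact hinv ⟨h0, hi, hbb, hn⟩
          · left; simpa using h0
        rw [pvGoA_eq cs (i+1) acc (by
          rintro ⟨-, -, hb2, -⟩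
          simp only [Nat.add_sub_cancel] at hb2
          rw [hn] at hb2; exact absurd hb2 (by decide))]
        rw [hdrop]
        simp only [List.zipIdx_cons, List.filter_cons, hkeepfalse]
        simp
      · simp only [if_neg hn]
        have c1 : ((cs[i]! != '\n' || (decide (0 < i) && (cs[i - 1]! == '\\'))) : Bool) = true := by
          have h1 : (cs[i]! != '\n') = true := bne_iff_ne.mpr hn
          rw [Bool.or_eq_true]; exact Or.inl h1
        rw [pvGoA_eq cs (i+1) _ (by
          rintro ⟨-, h2, hb2, hn2⟩
          simp only [Nat.add_sub_cancel] at hb2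
          exact hnp ⟨hb2, h2, hn2⟩)]
        rw [hdrop]
        simp only [List.zipIdx_cons, List.filter_cons, c1, if_true, List.map_cons]
        simp
  · rename_i hi
    have : cs.drop i = [] := List.drop_eq_nil_of_le (by omega)
    simp [this]
termination_by cs.length - i

-- ===== VERDICT (by name: the statement is the Claim_ definition above) =====
theorem remove_unescaped_new_lines_py_spec : Claim_equal_remove_unescaped_new_lines_py := by
  intro s _
  unfold Spec_remove_unescaped_new_lines_py remove_unescaped_new_lines_py remove_unescaped_new_lines_py_alt
  rw [pvGoA_eq s.toList 0 [] (by simp)]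
  simp
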